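-- pv_equiv track=rewrite | github.com/HyosikMoon/Algorithms | Python/DailyCoding/220621_WordsOrder.py | words_order
-- ===== SOURCE A (Python) =====
-- def words_order(text: str, words: list) -> bool:
--     indices = []
--     text = text.split()
--     words2 = words.copy()
--     for w in words2:
--         words.remove(w)
--         if w in words: return False
--         if w not in text: return False
--         indices.append(text.index(w))
--
--     for i in range(len(indices) - 1):
--         if indices[i] < indices[i+1]: continue
--         else: return False
--
--     return True
-- ===== SOURCE B (Python) =====
-- def words_order(text: str, words: list) -> bool:
--     # One pass over the tokens builds a first-occurrence index; one pass over
--     # the words checks distinctness, presence and increasing position.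
--     # (Unlike A, this does not mutate `words`; return value is identical.)
--     first = {}
--     for i, tok in enumerate(text.split()):
--         if tok not in first:
--             first[tok] = i
--     seen = set()
--     prev = -1
--     for w in words:
--         if w in seen:
--             return False
--         if w not in first:
--             return False
--         i = first[w]
--         if not (prev < i):
--             return False
--         seen.add(w)
--         prev = i
--     return True
-- ===== Notes on version B (the rewrite author's own statement) =====
-- stated objective: alternative
-- what changed: A rescans the token list and the words list for every word (list.remove, two membership tests and list.index per word) and then checks the collected indices in a second pass; B builds a first-occurrence dict over the tokens once and makes a single pass over the words with a seen-set and the previous index, and B does not mutate the words argument.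
import Mathlib
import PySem

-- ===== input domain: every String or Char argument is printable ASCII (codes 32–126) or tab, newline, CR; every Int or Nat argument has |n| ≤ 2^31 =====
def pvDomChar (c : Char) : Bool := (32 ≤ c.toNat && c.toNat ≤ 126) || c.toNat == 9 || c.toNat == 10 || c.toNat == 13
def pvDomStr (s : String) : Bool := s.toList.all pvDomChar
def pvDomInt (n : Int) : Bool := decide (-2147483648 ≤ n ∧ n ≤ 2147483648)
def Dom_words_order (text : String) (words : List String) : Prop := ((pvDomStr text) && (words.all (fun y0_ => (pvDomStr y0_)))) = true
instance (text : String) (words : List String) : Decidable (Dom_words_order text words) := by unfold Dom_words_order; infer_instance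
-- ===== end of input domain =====

-- B replaces A's per-word rescans of the token list and of `words` (list.remove, `in`,
-- list.index per word, then a second pass over the indices) by a first-occurrence dict
-- built once plus a single pass over the words with a seen-set (alternative algorithm).
-- A also empties `words` in place, B does not mutate it; the equivalence claimed here is
-- about the return value.

-- ===== PORT A =====
-- A's second loop: for i in range(len(indices)-1): if indices[i] < indices[i+1]: continue else: return False
-- counted loop: `fuel` is the number of iterations left of `for i in range(len(indices)-1)`
def wordsPassAux (indices : List Int) : Nat → Nat → Bool
  | 0, _ => true
  | fuel + 1, i =>
    if (indices[i]?.getD 0) < (indices[i+1]?.getD 0) then wordsPassAux indices fuel (i+1) else false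

def wordsPassIdx (indices : List Int) (i : Nat) : Bool :=
  wordsPassAux indices (indices.length - 1 - i) i

-- A's first loop: state is the mutated `words` (ws), the iterated copy words2 (rest), indices
def wordsLoopA (toks : List String) : List String → List String → List Int → Bool
  | _, [], indices => wordsPassIdx indices 0
  | ws, w :: rest, indices =>
    match PySem.List.remove? ws w with
    | none => false           -- Python would raise ValueError; unreachable (w is drawn from a copy of ws)
    | some ws' =>
      if ws'.contains w then false
      else if !(toks.contains w) then false
      else match PySem.List.index? toks w with
        | none => false       -- unreachable: membership just checked
        | some k => wordsLoopA toks ws' rest (indices ++ [(k : Int)])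

def words_order (text : String) (words : List String) : Bool :=
  wordsLoopA (PySem.Str.split₀ text) words words []

-- ===== PORT B =====
def wordsFirstDict (toks : List String) : PySem.Dict String Int :=
  (PySem.List.enumerate toks 0).foldl
    (fun d p => if d.contains p.2 then d else d.insert p.2 p.1) PySem.Dict.empty

def wordsLoopB (first : PySem.Dict String Int) : List String → PySem.Set String → Int → Bool
  | [], _, _ => true
  | w :: rest, seen, prev =>
    if PySem.Set.contains seen w then false
    else match first.get? w with
      | none => false
      | some i => if ¬ (prev < i) then false else wordsLoopB first rest (seen.add w) i

def words_order_alt (text : String) (words : List String) : Bool :=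
  wordsLoopB (wordsFirstDict (PySem.Str.split₀ text)) words PySem.Set.empty (-1)

-- ===== PRECONDITION & SPEC =====
def Spec_words_order (text : String) (words : List String) (out : Bool) : Prop := out = words_order_alt text words
instance (text : String) (words : List String) (out : Bool) : Decidable (Spec_words_order text words out) := by unfold Spec_words_order; infer_instance

-- ===== CLAIM (what is proved, stated in full; the proofs are below) =====
def Claim_equal_words_order : Prop := ∀ (text : String) (words : List String), Dom_words_order text words → Spec_words_order text words (words_order text words)

-- ===== LEMMAS AND PROOFS =====

-- reference predicate: adjacent elements strictly increase
def chainPair : List Int → Bool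
  | a :: b :: t => decide (a < b) && chainPair (b :: t)
  | _ => true

-- the (total) first-occurrence index both sides compute for present words
def wordsIdx (toks : List String) (w : String) : Int := ((PySem.List.index? toks w).getD 0 : Nat)

theorem chainPair_short (l : List Int) (h : l.length ≤ 1) : chainPair l = true := by
  match l, h with
  | [], _ => rfl
  | [a], _ => rfl

theorem wordsPassAux_eq (l : List Int) (fuel i : Nat) (hf : fuel = l.length - 1 - i) :
    wordsPassAux l fuel i = chainPair (l.drop i) := by
  induction fuel generalizing i with
  | zero =>
    rw [wordsPassAux, chainPair_short]
    simp
    omega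
  | succ fuel ih =>
    have h1 : i < l.length := by omega
    have h2 : i + 1 < l.length := by omega
    rw [wordsPassAux]
    rw [List.drop_eq_getElem_cons h1, List.drop_eq_getElem_cons h2]
    rw [show chainPair (l[i] :: l[i+1] :: l.drop (i+1+1)) = (decide (l[i] < l[i+1]) && chainPair (l[i+1] :: l.drop (i+1+1))) from rfl]
    rw [← List.drop_eq_getElem_cons h2, ih (i+1) (by omega)]
    by_cases hlt : l[i] < l[i+1]
    · simp [h1, h2, hlt]
    · simp [h1, h2, hlt]

theorem wordsPassIdx_eq (l : List Int) (i : Nat) : wordsPassIdx l i = chainPair (l.drop i) := by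
  rw [wordsPassIdx, wordsPassAux_eq l _ i rfl]

theorem wordsLoopA_eq (toks : List String) (rest : List String) (acc : List Int) :
    wordsLoopA toks rest rest acc =
      (decide rest.Nodup && rest.all (fun w => toks.contains w)
        && wordsPassIdx (acc ++ rest.map (wordsIdx toks)) 0) := by
  induction rest generalizing acc with
  | nil => simp [wordsLoopA]
  | cons w rest ih =>
    simp only [wordsLoopA, PySem.List.remove?_cons_self]
    by_cases hw : w ∈ rest
    · simp [hw, List.nodup_cons]
    · by_cases hm : w ∈ toks
      · obtain ⟨k, hk⟩ := Option.isSome_iff_exists.mp ((PySem.List.index?_isSome_iff toks w).mpr hm)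
        have hc1 : rest.contains w = false := by simpa using hw
        have hc2 : toks.contains w = true := by simpa using hm
        have hidx : wordsIdx toks w = (k : Int) := by unfold wordsIdx; rw [hk]; rfl
        simp only [hc1, hc2, Bool.not_true, Bool.false_eq_true, if_false, hk]
        rw [ih]
        have h3 : decide (w :: rest).Nodup = decide rest.Nodup := by
          simp [List.nodup_cons, hw]
        have h4 : (w :: rest).all (fun w => toks.contains w)
            = rest.all (fun w => toks.contains w) := by
          simp [hm]
        rw [h3, h4, List.map_cons, hidx, ← List.append_cons]
      · simp [hw, hm, List.nodup_cons]

theorem wordsFirstAux (w : String) (toks : List String) (s : Int) (d : PySem.Dict String Int) :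
    ((PySem.List.enumerate toks s).foldl (fun d p => if d.contains p.2 then d else d.insert p.2 p.1) d).get? w
      = ((d.get? w).or ((PySem.List.index? toks w).map (fun k : Nat => s + (k : Int)))) := by
  induction toks generalizing s d with
  | nil => simp [PySem.List.enumerate_nil]
  | cons t toks ih =>
    rw [PySem.List.enumerate_cons, List.foldl_cons]
    by_cases hw : w = t
    · subst hw
      by_cases hc : d.contains w
      · obtain ⟨v, hv⟩ := Option.isSome_iff_exists.mp
          (by rw [← PySem.Dict.contains_eq_isSome_get? d w]; exact hc)
        rw [if_pos hc, ih, hv, PySem.List.index?_cons_self]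
        rfl
      · have hn : d.get? w = none := by
          rw [PySem.Dict.contains_eq_isSome_get? d w] at hc
          exact Option.not_isSome_iff_eq_none.mp hc
        rw [if_neg hc, ih, PySem.Dict.get?_insert_self, hn, PySem.List.index?_cons_self]
        simp
    · have hne : w ≠ t := hw
      rw [PySem.List.index?_cons_of_ne _ (fun h => hne h.symm)]
      by_cases hc : d.contains t
      · rw [if_pos hc, ih, Option.map_map]
        congr 1
        apply Option.map_congr
        intro a _
        simp only [Function.comp_apply]
        push_cast
        ring
      · rw [if_neg hc, ih, PySem.Dict.get?_insert_of_ne _ _ hne, Option.map_map]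
        congr 1
        apply Option.map_congr
        intro a _
        simp only [Function.comp_apply]
        push_cast
        ring

theorem wordsFirstDict_get (toks : List String) (w : String) :
    (wordsFirstDict toks).get? w = (PySem.List.index? toks w).map (fun k : Nat => (k : Int)) := by
  rw [wordsFirstDict, wordsFirstAux]
  simp

theorem wordsLoopB_eq (toks : List String) (rest : List String) (seen : PySem.Set String) (prev : Int) :
    wordsLoopB (wordsFirstDict toks) rest seen prev =
      (rest.all (fun w => !(PySem.Set.contains seen w)) && decide rest.Nodup
        && rest.all (fun w => toks.contains w) && chainPair (prev :: rest.map (wordsIdx toks))) := by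
  induction rest generalizing seen prev with
  | nil => simp [wordsLoopB, chainPair]
  | cons w rest ih =>
    rw [show wordsLoopB (wordsFirstDict toks) (w :: rest) seen prev
        = (if PySem.Set.contains seen w then false
           else match (wordsFirstDict toks).get? w with
             | none => false
             | some i => if ¬ (prev < i) then false
                 else wordsLoopB (wordsFirstDict toks) rest (seen.add w) i) from rfl]
    by_cases hs : PySem.Set.contains seen w
    · have hs' : w ∈ seen := (PySem.Set.contains_iff seen w).mp hs
      simp [hs']
    · have hs' : w ∉ seen := fun h => hs ((PySem.Set.contains_iff seen w).mpr h)
      rw [if_neg hs, wordsFirstDict_get]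
      by_cases hm : w ∈ toks
      · obtain ⟨k, hk⟩ := Option.isSome_iff_exists.mp ((PySem.List.index?_isSome_iff toks w).mpr hm)
        have hidx : wordsIdx toks w = (k : Int) := by unfold wordsIdx; rw [hk]; rfl
        simp only [hk, Option.map_some]
        by_cases hlt : prev < (k : Int)
        · rw [if_neg (not_not_intro hlt), ih, Bool.eq_iff_iff]
          simp [List.all_eq_true, List.nodup_cons, chainPair, hidx, hlt, hs',
            hm]
          intro _ _
          constructor
          · rintro ⟨h1, h2⟩
            exact ⟨fun x hx => (h1 x hx).1, fun hwr => (h1 w hwr).2 rfl, h2⟩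
          · rintro ⟨h1, h2, h3⟩
            exact ⟨fun x hx => ⟨h1 x hx, fun he => h2 (he ▸ hx)⟩, h3⟩
        · rw [if_pos hlt, Bool.eq_iff_iff]
          simp [chainPair, hidx, hlt]
      · have hn : PySem.List.index? toks w = none := (PySem.List.index?_eq_none_iff toks w).mpr hm
        rw [hn, Option.map_none]
        simp [hm]

theorem wordsGlue (toks : List String) (words : List String) :
    (decide words.Nodup && words.all (fun w => toks.contains w)
        && chainPair (words.map (wordsIdx toks)))
      = (words.all (fun w => !(PySem.Set.contains (PySem.Set.empty : PySem.Set String) w))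
          && decide words.Nodup && words.all (fun w => toks.contains w)
          && chainPair ((-1 : Int) :: words.map (wordsIdx toks))) := by
  cases words with
  | nil => simp [chainPair]
  | cons w ws =>
    have hpos : (-1 : Int) < wordsIdx toks w := by
      have := Int.natCast_nonneg ((PySem.List.index? toks w).getD 0)
      unfold wordsIdx
      omega
    rw [show chainPair ((-1 : Int) :: (w :: ws).map (wordsIdx toks))
        = (decide ((-1 : Int) < wordsIdx toks w) && chainPair ((w :: ws).map (wordsIdx toks))) from by
          simp only [List.map_cons]; rfl]
    rw [Bool.eq_iff_iff]
    simp [hpos, PySem.Set.empty]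

-- ===== VERDICT (by name: the statement is the Claim_ definition above) =====
theorem words_order_spec : Claim_equal_words_order := by
  intro text words _
  unfold Spec_words_order words_order words_order_alt
  rw [wordsLoopA_eq, wordsLoopB_eq, wordsPassIdx_eq]
  simp only [List.nil_append, List.drop_zero]
  exact wordsGlue _ _
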